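-- pv_equiv track=rewrite | github.com/ty-hayes-82/data-analyst-agent | web/contract_detector.py | _clean_numeric_token
-- ===== SOURCE A (Python) =====
-- CURRENCY_SYMBOLS = ("$", "€", "£")
--
-- def _clean_numeric_token(value: str) -> str:
--     if value is None:
--         return ""
--     cleaned = value.replace(",", "").strip()
--     for sym in CURRENCY_SYMBOLS:
--         cleaned = cleaned.replace(sym, "")
--     cleaned = cleaned.replace("%", "")
--     return cleaned.strip()
-- ===== SOURCE B (Python) =====
-- _DELETE = {',', '$', '\u20ac', '\u00a3', '%'}
--
-- def _clean_numeric_token(value: str) -> str: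
--     if value is None:
--         return ""
--     return ''.join(ch for ch in value if ch not in _DELETE).strip()
-- ===== Notes on version B (the rewrite author's own statement) =====
-- stated objective: simpler
-- what changed: Replaces A's chain of five full-string replace scans plus an interior strip with a single character-filter pass against a deletion set followed by one final strip.
import Mathlib
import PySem

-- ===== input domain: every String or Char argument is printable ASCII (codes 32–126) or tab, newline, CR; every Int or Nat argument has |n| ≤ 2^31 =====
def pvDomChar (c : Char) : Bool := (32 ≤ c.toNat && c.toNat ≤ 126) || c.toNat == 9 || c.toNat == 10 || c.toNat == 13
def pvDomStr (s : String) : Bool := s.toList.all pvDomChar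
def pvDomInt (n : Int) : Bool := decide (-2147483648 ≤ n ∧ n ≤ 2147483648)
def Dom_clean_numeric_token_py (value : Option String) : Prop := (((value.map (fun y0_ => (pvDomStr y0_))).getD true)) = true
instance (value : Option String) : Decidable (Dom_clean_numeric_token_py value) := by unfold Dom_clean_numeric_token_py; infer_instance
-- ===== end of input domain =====

-- B replaces A's chain of five full-string replace scans plus an interior strip by one
-- character-filter pass against a deletion set followed by a single final strip (simpler).

-- ===== PORT A =====
def clean_numeric_token_py (value : Option String) : String :=
  match value with
  | none => ""
  | some value =>
    let cleaned := PySem.Str.strip (PySem.Str.replace value "," "")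
    let cleaned := ["$", "€", "£"].foldl (fun acc sym => PySem.Str.replace acc sym "") cleaned
    let cleaned := PySem.Str.replace cleaned "%" ""
    PySem.Str.strip cleaned

-- ===== PORT B =====
def pvDel : List Char := [',', '$', '€', '£', '%']

def clean_numeric_token_py_alt (value : Option String) : String :=
  match value with
  | none => ""
  | some s =>
    PySem.Str.strip (String.ofList (s.toList.filter (fun ch => !(pvDel.contains ch))))

-- ===== PRECONDITION & SPEC =====
def Spec_clean_numeric_token_py (value : Option String) (out : String) : Prop := out = clean_numeric_token_py_alt value
instance (value : Option String) (out : String) : Decidable (Spec_clean_numeric_token_py value out) := by unfold Spec_clean_numeric_token_py; infer_instance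

-- ===== CLAIM (what is proved, stated in full; the proofs are below) =====
def Claim_equal_clean_numeric_token_py : Prop := ∀ (value : Option String), Dom_clean_numeric_token_py value → Spec_clean_numeric_token_py value (clean_numeric_token_py value)

-- ===== LEMMAS AND PROOFS =====

-- replace with a single-char pattern and empty replacement is a filter
theorem replace_go_filter (d : Char) :
    ∀ (fuel : Nat) (l acc : List Char), l.length ≤ fuel →
      PySem.Chars.replace.go [d] [] fuel l acc
        = acc.reverse ++ l.filter (fun c => !(c == d)) := by
  intro fuel
  induction fuel with
  | zero =>
    intro l acc h
    cases l with
    | nil => simp [PySem.Chars.replace.go]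
    | cons c t => simp at h
  | succ n ih =>
    intro l acc h
    cases l with
    | nil => simp [PySem.Chars.replace.go]
    | cons c t =>
      simp only [PySem.Chars.replace.go]
      by_cases hc : c = d
      · subst hc
        rw [if_pos (by simp [List.isPrefixOf])]
        simp only [List.length_cons, List.length_nil, Nat.zero_add, List.drop_succ_cons,
          List.drop_zero, List.reverse_nil, List.nil_append]
        rw [ih t acc (Nat.le_of_succ_le_succ h)]
        simp
      · rw [if_neg (by simp [List.isPrefixOf]; exact fun h' => hc h'.symm)]
        rw [ih t (c :: acc) (Nat.le_of_succ_le_succ h)]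
        simp [hc]

theorem replace_single (d : Char) (cs : List Char) :
    PySem.Chars.replace cs [d] [] = cs.filter (fun c => !(c == d)) := by
  simp only [PySem.Chars.replace, List.isEmpty_cons, Bool.false_eq_true, if_false]
  rw [replace_go_filter d cs.length cs [] (le_refl _)]
  simp

-- dropWhile-level core: filtering (with a space-preserving predicate) after a left strip
theorem dropWhile_filter_dropWhile (p : Char → Bool)
    (hp : ∀ c, PySem.Chars.isspace c = true → p c = true) :
    ∀ cs : List Char,
      ((cs.dropWhile PySem.Chars.isspace).filter p).dropWhile PySem.Chars.isspace
        = (cs.filter p).dropWhile PySem.Chars.isspace := by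
  intro cs
  induction cs with
  | nil => simp
  | cons c t ih =>
    by_cases hc : PySem.Chars.isspace c = true
    · rw [List.dropWhile_cons_of_pos hc, ih]
      simp [hp c hc, List.dropWhile_cons_of_pos hc]
    · rw [List.dropWhile_cons_of_neg hc]

theorem lstrip_filter_lstrip (p : Char → Bool)
    (hp : ∀ c, PySem.Chars.isspace c = true → p c = true) (cs : List Char) :
    PySem.Chars.lstrip ((PySem.Chars.lstrip cs).filter p)
      = PySem.Chars.lstrip (cs.filter p) := by
  simp only [PySem.Chars.lstrip]
  exact dropWhile_filter_dropWhile p hp cs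

theorem rstrip_filter_rstrip (p : Char → Bool)
    (hp : ∀ c, PySem.Chars.isspace c = true → p c = true) (cs : List Char) :
    PySem.Chars.rstrip ((PySem.Chars.rstrip cs).filter p)
      = PySem.Chars.rstrip (cs.filter p) := by
  simp only [PySem.Chars.rstrip, List.filter_reverse, List.reverse_reverse]
  rw [dropWhile_filter_dropWhile p hp cs.reverse]
  simp [List.filter_reverse]

-- left and right stripping commute
theorem lstrip_rstrip_comm (cs : List Char) :
    PySem.Chars.lstrip (PySem.Chars.rstrip cs)
      = PySem.Chars.rstrip (PySem.Chars.lstrip cs) := by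
  induction cs with
  | nil => rfl
  | cons c t ih =>
    by_cases he : List.dropWhile PySem.Chars.isspace t.reverse = []
    · have ht : ∀ x ∈ t, PySem.Chars.isspace x = true := by
        intro x hx
        exact List.dropWhile_eq_nil_iff.mp he x (List.mem_reverse.mpr hx)
      by_cases hc : PySem.Chars.isspace c = true
      · simp [PySem.Chars.rstrip, PySem.Chars.lstrip, List.dropWhile_append, he, hc,
          List.dropWhile_eq_nil_iff.mpr ht]
      · simp [PySem.Chars.rstrip, PySem.Chars.lstrip, List.dropWhile_append, he, hc]
    · have hr : PySem.Chars.rstrip (c :: t) = c :: PySem.Chars.rstrip t := by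
        simp [PySem.Chars.rstrip, List.dropWhile_append, he]
      by_cases hc : PySem.Chars.isspace c = true
      · rw [hr,
          show PySem.Chars.lstrip (c :: PySem.Chars.rstrip t)
              = PySem.Chars.lstrip (PySem.Chars.rstrip t) from List.dropWhile_cons_of_pos hc,
          show PySem.Chars.lstrip (c :: t) = PySem.Chars.lstrip t from
            List.dropWhile_cons_of_pos hc, ih]
      · rw [show PySem.Chars.lstrip (c :: t) = c :: t from List.dropWhile_cons_of_neg hc, hr,
          show PySem.Chars.lstrip (c :: PySem.Chars.rstrip t)
              = c :: PySem.Chars.rstrip t from List.dropWhile_cons_of_neg hc, ← hr]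

-- filtering between the two strips can be pulled out of the inner strip
theorem strip_filter_strip (p : Char → Bool)
    (hp : ∀ c, PySem.Chars.isspace c = true → p c = true) (cs : List Char) :
    PySem.Chars.strip ((PySem.Chars.strip cs).filter p)
      = PySem.Chars.strip (cs.filter p) := by
  have step1 : ∀ z, PySem.Chars.strip ((PySem.Chars.rstrip z).filter p)
      = PySem.Chars.strip (z.filter p) := by
    intro z
    simp only [PySem.Chars.strip]
    rw [← lstrip_rstrip_comm, ← lstrip_rstrip_comm, rstrip_filter_rstrip p hp]
  have step2 : ∀ z, PySem.Chars.strip ((PySem.Chars.lstrip z).filter p)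
      = PySem.Chars.strip (z.filter p) := by
    intro z
    simp only [PySem.Chars.strip]
    rw [lstrip_filter_lstrip p hp]
  have hs : PySem.Chars.strip cs = PySem.Chars.rstrip (PySem.Chars.lstrip cs) := rfl
  rw [hs, step1, step2]

theorem hp_comb : ∀ c : Char, PySem.Chars.isspace c = true →
    (!(c == '%') && !(c == '£') && !(c == '€') && !(c == '$')) = true := by
  intro c h
  have h1 : c ≠ '%' := by rintro rfl; exact absurd h (by decide)
  have h2 : c ≠ '£' := by rintro rfl; exact absurd h (by decide)
  have h3 : c ≠ '€' := by rintro rfl; exact absurd h (by decide)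
  have h4 : c ≠ '$' := by rintro rfl; exact absurd h (by decide)
  simp [h1, h2, h3, h4]

theorem main_eq (s : String) :
    clean_numeric_token_py (some s) = clean_numeric_token_py_alt (some s) := by
  rw [← String.toList_inj]
  simp only [clean_numeric_token_py, clean_numeric_token_py_alt, List.foldl,
    PySem.Str.toList_strip, PySem.Str.toList_replace, String.toList_ofList]
  have hlit : (",".toList = [',']) ∧ ("$".toList = ['$']) ∧ ("€".toList = ['€'])
      ∧ ("£".toList = ['£']) ∧ ("%".toList = ['%']) ∧ ("".toList = ([] : List Char)) := by decide
  rw [hlit.1, hlit.2.1, hlit.2.2.1, hlit.2.2.2.1, hlit.2.2.2.2.1, hlit.2.2.2.2.2]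
  rw [replace_single, replace_single, replace_single, replace_single, replace_single]
  rw [List.filter_filter, List.filter_filter, List.filter_filter]
  rw [strip_filter_strip _ hp_comb]
  rw [List.filter_filter]
  congr 1
  apply List.filter_congr
  intro c _
  simp only [pvDel, List.contains_cons, List.contains_nil, Bool.or_false, Bool.not_or]
  cases h1 : c == ',' <;> cases h2 : c == '$' <;> cases h3 : c == '€' <;>
    cases h4 : c == '£' <;> cases h5 : c == '%' <;> rfl

-- ===== VERDICT (by name: the statement is the Claim_ definition above) =====
theorem clean_numeric_token_py_spec : Claim_equal_clean_numeric_token_py := by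
  intro value _
  unfold Spec_clean_numeric_token_py
  cases value with
  | none => rfl
  | some s => exact main_eq s
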